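-- pv_equiv track=rewrite | github.com/yantianqi1/airp2 | utils/text_utils.py | get_text_markers
-- ===== SOURCE A (Python) =====
-- def get_text_markers(text, marker_length=30):
--     """Get start and end markers from text."""
--     lines = [line.strip() for line in text.split('\n') if line.strip()]
--
--     if not lines:
--         return "", ""
--
--     # Find first substantial line
--     start_marker = ""
--     for line in lines:
--         if len(line) >= 15:
--             start_marker = line[:marker_length]
--             break
--
--     # Find last substantial line
--     end_marker = ""
--     for line in reversed(lines):
--         if len(line) >= 15:
--             end_marker = line[-marker_length:]
--             break
--
--     return start_marker, end_marker
-- ===== SOURCE B (Python) =====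
-- def get_text_markers(text, marker_length=30):
--     """Get start and end markers from text."""
--     first = None
--     last = None
--     for raw in text.split('\n'):
--         s = raw.strip()
--         if len(s) >= 15:
--             if first is None:
--                 first = s
--             last = s
--     if first is None:
--         return "", ""
--     return first[:marker_length], last[-marker_length:]
-- ===== Notes on version B (the rewrite author's own statement) =====
-- stated objective: alternative
-- what changed: B replaces A's three staged passes (materialize the stripped non-empty line list, forward early-break scan, backward early-break scan over reversed(lines)) with one streaming forward pass that keeps first/last substantial-line accumulators and never builds a list or traverses backwards.
import Mathlib
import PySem

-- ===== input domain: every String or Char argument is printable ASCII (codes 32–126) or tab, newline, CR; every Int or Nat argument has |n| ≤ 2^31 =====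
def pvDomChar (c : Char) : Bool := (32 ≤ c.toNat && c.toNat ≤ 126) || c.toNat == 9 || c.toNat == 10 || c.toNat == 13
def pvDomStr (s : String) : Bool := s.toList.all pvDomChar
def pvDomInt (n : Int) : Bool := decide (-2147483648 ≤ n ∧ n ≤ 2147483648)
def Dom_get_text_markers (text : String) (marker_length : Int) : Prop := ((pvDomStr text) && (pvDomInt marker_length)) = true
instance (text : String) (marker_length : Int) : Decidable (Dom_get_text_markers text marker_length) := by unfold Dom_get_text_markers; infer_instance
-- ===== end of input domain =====

-- B replaces A's list build plus two early-break scans by a single streaming pass with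
-- first/last accumulators; objective: alternative (same cost, different traversal).

-- ===== PORT A =====
-- 'for line in …: if len(line) >= 15: marker = g(line); break' with marker initialised to ""
def gtmScan (g : List Char → List Char) : List (List Char) → List Char
  | [] => []
  | l :: ls => if 15 ≤ l.length then g l else gtmScan g ls

def get_text_markers (text : String) (marker_length : Int) : String × String :=
  let lines := ((PySem.Chars.splitOn text.toList ['\n']).map PySem.Chars.strip).filter
      (fun l => decide (l ≠ []))
  if lines = [] then ("", "")
  else
    (String.mk (gtmScan (fun l => PySem.List.slice l none (some marker_length)) lines),
     String.mk (gtmScan (fun l => PySem.List.slice l (some (-marker_length)) none) lines.reverse))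

-- ===== PORT B =====
-- the loop body: strip the raw line; if substantial, set first when unset and always update last
def gtmStep (st : Option (List Char) × Option (List Char)) (raw : List Char) :
    Option (List Char) × Option (List Char) :=
  let s := PySem.Chars.strip raw
  if 15 ≤ s.length then ((if st.1 = none then some s else st.1), some s) else st

def get_text_markers_alt (text : String) (marker_length : Int) : String × String :=
  let st := (PySem.Chars.splitOn text.toList ['\n']).foldl gtmStep (none, none)
  match st with
  | (none, _) => ("", "")
  | (some f, l) =>
      (String.mk (PySem.List.slice f none (some marker_length)),
       String.mk (PySem.List.slice (l.getD []) (some (-marker_length)) none))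

-- ===== PRECONDITION & SPEC =====
def Spec_get_text_markers (text : String) (marker_length : Int) (out : String × String) : Prop := out = get_text_markers_alt text marker_length
instance (text : String) (marker_length : Int) (out : String × String) : Decidable (Spec_get_text_markers text marker_length out) := by unfold Spec_get_text_markers; infer_instance

-- ===== CLAIM (what is proved, stated in full; the proofs are below) =====
def Claim_equal_get_text_markers : Prop := ∀ (text : String) (marker_length : Int), Dom_get_text_markers text marker_length → Spec_get_text_markers text marker_length (get_text_markers text marker_length)

-- ===== LEMMAS AND PROOFS =====

-- A's break-loop returns g of the first substantial line, "" if there is none.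
theorem gtmScan_eq (g : List Char → List Char) (L : List (List Char)) :
    gtmScan g L = ((L.filter (fun l => decide (15 ≤ l.length))).head?.map g).getD [] := by
  induction L with
  | nil => rfl
  | cons l ls ih =>
      by_cases h : 15 ≤ l.length <;> simp [gtmScan, h, ih]

-- filtering out empty lines first does not change the substantial lines
theorem filter_ne_filter_len (M : List (List Char)) :
    (M.filter (fun l => decide (l ≠ []))).filter (fun l => decide (15 ≤ l.length))
      = M.filter (fun l => decide (15 ≤ l.length)) := by
  rw [List.filter_filter]
  apply List.filter_congr
  intro a _
  by_cases h : 15 ≤ a.length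
  · have : a ≠ [] := by
      intro e; subst e; simp at h
    simp [h, this]
  · simp [h]

-- B's fold computes (first, last) of the substantial stripped lines, seeded by the state
theorem gtmFold_inv (L : List (List Char)) (f l : Option (List Char)) :
    L.foldl gtmStep (f, l)
      = (f.or ((L.map PySem.Chars.strip).filter (fun s => decide (15 ≤ s.length))).head?,
         ((L.map PySem.Chars.strip).filter (fun s => decide (15 ≤ s.length))).getLast?.or l) := by
  induction L generalizing f l with
  | nil => simp
  | cons raw rest ih =>
      by_cases h : 15 ≤ (PySem.Chars.strip raw).length
      · simp only [List.foldl_cons, gtmStep, h, if_true, decide_true, List.map_cons,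
          List.filter_cons, ih, Prod.mk.injEq]
        constructor
        · cases f <;> simp
        · cases hF : ((rest.map PySem.Chars.strip).filter (fun s => decide (15 ≤ s.length))) with
          | nil => simp
          | cons x xs =>
              cases hg : (x :: xs).getLast? with
              | none => simp at hg
              | some y => simp [hg]
      · simp only [List.foldl_cons, gtmStep, h, if_false, decide_false, List.map_cons,
          List.filter_cons]
        rw [if_neg (by simpa using h)]
        exact ih f l

-- ===== VERDICT (by name: the statement is the Claim_ definition above) =====
theorem get_text_markers_spec : Claim_equal_get_text_markers := by
  intro text ml _
  unfold Spec_get_text_markers get_text_markers get_text_markers_alt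
  set M := (PySem.Chars.splitOn text.toList ['\n']).map PySem.Chars.strip with hM
  set lines := M.filter (fun l => decide (l ≠ [])) with hlines
  have hfil : lines.filter (fun l => decide (15 ≤ l.length))
      = M.filter (fun l => decide (15 ≤ l.length)) := filter_ne_filter_len M
  have hrev : lines.reverse.filter (fun l => decide (15 ≤ l.length))
      = (M.filter (fun l => decide (15 ≤ l.length))).reverse := by
    rw [List.filter_reverse, hfil]
  have hfold := gtmFold_inv (PySem.Chars.splitOn text.toList ['\n']) none none
  rw [← hM] at hfold
  simp only [hfold, Option.none_or, Option.or_none]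
  cases hF : M.filter (fun l => decide (15 ≤ l.length)) with
  | nil =>
      simp only [gtmScan_eq, hfil, hrev, hF]
      split <;> rfl
  | cons x xs =>
      have hne : lines ≠ [] := by
        intro e
        rw [e] at hfil
        rw [hF] at hfil
        exact (List.cons_ne_nil x xs) hfil.symm
      simp only [gtmScan_eq, hfil, hrev, hF, if_neg hne]
      rw [List.head?_reverse]
      cases hL : (x :: xs).getLast? with
      | none => simp at hL
      | some y => simp
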